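-- pv_equiv track=rewrite | github.com/zahrasafdari/labs109 | labs109.py | pyramid_blocks
-- ===== SOURCE A (Python) =====
-- def pyramid_blocks(n, m, h):
--     # a variable to hold the result
--     result = 0
--     # if we have only one layer the result woud be n times m
--     if h == 1:
--         result = n*m
--     # otherwise we should iterate through the range of the h
--     for i in range(h):
--         # in erach layer the number of the row and columns are i units greater so we add i for row and column
--         each_layer = ((n + i) * (m + i))
--         # update the result
--         result += each_layer
--     return result
-- ===== SOURCE B (Python) =====
-- def pyramid_blocks(n, m, h):
--     # closed form of sum_{i=0}^{h-1} (n+i)(m+i); empty sum for h <= 0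
--     if h <= 0:
--         return 0
--     return h*n*m + (n + m) * (h*(h - 1)//2) + (h - 1)*h*(2*h - 1)//6
-- ===== Notes on version B (the rewrite author's own statement) =====
-- stated objective: faster
-- what changed: Replaces the O(h) layer-by-layer loop with the O(1) closed form h*n*m + (n+m)*h(h-1)/2 + (h-1)h(2h-1)/6.
-- intended difference: For h==1 with n and m both nonzero, A returns 2*n*m because it sets result=n*m and then the loop adds the i=0 layer n*m again; B returns n*m, the correct single-layer block count. — e.g. on pyramid_blocks(2, 3, 1): A returns 12, B returns 6
import Mathlib
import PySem

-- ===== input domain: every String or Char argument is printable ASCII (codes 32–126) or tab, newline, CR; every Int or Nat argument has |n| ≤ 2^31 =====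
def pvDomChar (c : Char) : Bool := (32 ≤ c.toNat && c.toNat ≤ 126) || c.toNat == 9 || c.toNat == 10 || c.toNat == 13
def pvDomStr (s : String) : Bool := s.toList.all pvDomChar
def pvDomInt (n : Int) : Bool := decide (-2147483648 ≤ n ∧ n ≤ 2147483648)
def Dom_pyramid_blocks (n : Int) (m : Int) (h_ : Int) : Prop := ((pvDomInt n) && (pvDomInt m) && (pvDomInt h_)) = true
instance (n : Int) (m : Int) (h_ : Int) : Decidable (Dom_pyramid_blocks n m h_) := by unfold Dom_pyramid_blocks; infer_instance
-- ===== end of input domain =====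

-- B replaces A's O(h) loop with the O(1) closed-form sum of (n+i)(m+i); A double-counts the h==1 case (D_ below).


-- ===== PORT A =====
def pyramid_blocks (n : Int) (m : Int) (h_ : Int) : Int :=
  let result : Int := 0
  let result := if h_ == 1 then n * m else result
  (PySem.List.pyRange 0 h_ 1).foldl (fun result i =>
    let each_layer := (n + i) * (m + i)
    result + each_layer) result

-- ===== PORT B =====
def pyramid_blocks_alt (n : Int) (m : Int) (h_ : Int) : Int :=
  if h_ ≤ 0 then 0
  else h_ * n * m + (n + m) * PySem.Int.floordiv (h_ * (h_ - 1)) 2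
         + PySem.Int.floordiv ((h_ - 1) * h_ * (2 * h_ - 1)) 6

-- ===== PRECONDITION & SPEC =====
-- For h==1 with n≠0 and m≠0, A returns 2*n*m (it sets result=n*m and the loop adds the i=0 layer n*m again);
-- B returns n*m, the correct single-layer block count.
def D_pyramid_blocks (n : Int) (m : Int) (h_ : Int) : Prop := h_ = 1 ∧ n ≠ 0 ∧ m ≠ 0
instance (n : Int) (m : Int) (h_ : Int) : Decidable (D_pyramid_blocks n m h_) := by unfold D_pyramid_blocks; infer_instance
def Spec_pyramid_blocks (n : Int) (m : Int) (h_ : Int) (out : Int) : Prop := ¬ D_pyramid_blocks n m h_ → out = pyramid_blocks_alt n m h_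
instance (n : Int) (m : Int) (h_ : Int) (out : Int) : Decidable (Spec_pyramid_blocks n m h_ out) := by unfold Spec_pyramid_blocks; infer_instance

def pvDiffWitness_pyramid_blocks : Int × Int × Int := (2, 3, 1)
def pvDiffWitnessOut_pyramid_blocks : Int × Int := (12, 6)

-- ===== CLAIM (what is proved, stated in full; the proofs are below) =====
def Claim_unchanged_pyramid_blocks : Prop := ∀ (n : Int) (m : Int) (h_ : Int), Dom_pyramid_blocks n m h_ → Spec_pyramid_blocks n m h_ (pyramid_blocks n m h_)
def Claim_changed_pyramid_blocks : Prop := Dom_pyramid_blocks (pvDiffWitness_pyramid_blocks.1) (pvDiffWitness_pyramid_blocks.2.1) (pvDiffWitness_pyramid_blocks.2.2) ∧ D_pyramid_blocks (pvDiffWitness_pyramid_blocks.1) (pvDiffWitness_pyramid_blocks.2.1) (pvDiffWitness_pyramid_blocks.2.2) ∧ pyramid_blocks (pvDiffWitness_pyramid_blocks.1) (pvDiffWitness_pyramid_blocks.2.1) (pvDiffWitness_pyramid_blocks.2.2) = pvDiffWitnessOut_pyramid_blocks.1 ∧ pyramid_blocks_alt (pvDiffWitness_pyramid_blocks.1) (pvDiffWitness_pyramid_blocks.2.1)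 (pvDiffWitness_pyramid_blocks.2.2) = pvDiffWitnessOut_pyramid_blocks.2 ∧ pvDiffWitnessOut_pyramid_blocks.1 ≠ pvDiffWitnessOut_pyramid_blocks.2
def Claim_exact_pyramid_blocks : Prop := ∀ (n : Int) (m : Int) (h_ : Int), Dom_pyramid_blocks n m h_ → D_pyramid_blocks n m h_ → pyramid_blocks n m h_ ≠ pyramid_blocks_alt n m h_

-- ===== LEMMAS AND PROOFS =====

-- the fold over range(k), times 6, as a polynomial
theorem pv_fold6 (n m : Int) : ∀ (k : Nat) (init : Int),
    6 * ((PySem.List.pyRange 0 (k : Int) 1).foldl (fun r i => r + (n + i) * (m + i)) init)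
      = 6 * init + 6 * (k : Int) * n * m + 3 * (n + m) * (k : Int) * ((k : Int) - 1)
        + ((k : Int) - 1) * (k : Int) * (2 * (k : Int) - 1) := by
  intro k
  induction k with
  | zero => intro init; simp
  | succ k ih =>
    intro init
    have hsplit : PySem.List.pyRange 0 ((k + 1 : Nat) : Int) 1
        = PySem.List.pyRange 0 (k : Int) 1 ++ [(k : Int)] := by
      have := PySem.List.pyRange_one_succ_right (a := 0) (b := (k : Int)) (by exact_mod_cast Nat.zero_le k)
      push_cast
      exact this
    rw [hsplit, List.foldl_append]
    simp only [List.foldl_cons, List.foldl_nil]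
    have := ih init
    push_cast
    linear_combination this

theorem pv_dvd2 : ∀ (k : Nat), (2 : Int) ∣ (k : Int) * ((k : Int) - 1) := by
  intro k
  induction k with
  | zero => exact ⟨0, by norm_num⟩
  | succ k ih =>
    obtain ⟨c, hc⟩ := ih
    exact ⟨c + k, by push_cast; linear_combination hc⟩

theorem pv_dvd6 : ∀ (k : Nat), (6 : Int) ∣ ((k : Int) - 1) * (k : Int) * (2 * (k : Int) - 1) := by
  intro k
  induction k with
  | zero => exact ⟨0, by norm_num⟩
  | succ k ih =>
    obtain ⟨c, hc⟩ := ih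
    exact ⟨c + (k : Int) * k, by push_cast; linear_combination hc⟩

-- ===== VERDICT (by name: the statement is the Claim_ definition above) =====
theorem pyramid_blocks_spec : Claim_unchanged_pyramid_blocks := by
  intro n m h_ _ hD
  unfold pyramid_blocks pyramid_blocks_alt
  by_cases hle : h_ ≤ 0
  · have h1 : (h_ == 1) = false := by simp; omega
    rw [PySem.List.pyRange_one_eq_nil hle]
    simp [hle, h1]
  · -- 1 ≤ h_
    have hpos : 1 ≤ h_ := by omega
    have hk : ((h_.toNat : Int)) = h_ := Int.toNat_of_nonneg (by omega)
    -- the initial accumulator is 0: either h_ ≠ 1, or n*m = 0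
    have hinit : (if h_ == 1 then n * m else (0 : Int)) = 0 := by
      by_cases h1 : h_ = 1
      · have hnm : n = 0 ∨ m = 0 := by
          by_contra hc
          push_neg at hc
          exact hD ⟨h1, hc.1, hc.2⟩
        simp [h1]
        rcases hnm with h | h <;> simp [h]
      · simp [h1]
    simp only [hinit]
    have hfold := pv_fold6 n m h_.toNat 0
    rw [hk] at hfold
    obtain ⟨c2, hc2⟩ := pv_dvd2 h_.toNat
    obtain ⟨c6, hc6⟩ := pv_dvd6 h_.toNat
    rw [hk] at hc2 hc6
    have hf2 : PySem.Int.floordiv (h_ * (h_ - 1)) 2 = c2 := by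
      rw [hc2, PySem.Int.floordiv_eq_ediv_of_pos (by norm_num)]
      exact Int.mul_ediv_cancel_left c2 (by norm_num)
    have hf6 : PySem.Int.floordiv ((h_ - 1) * h_ * (2 * h_ - 1)) 6 = c6 := by
      rw [hc6, PySem.Int.floordiv_eq_ediv_of_pos (by norm_num)]
      exact Int.mul_ediv_cancel_left c6 (by norm_num)
    simp only [hle, if_false, hf2, hf6]
    -- both sides times 6 agree; conclude by linear arithmetic
    have key : 6 * ((PySem.List.pyRange 0 h_ 1).foldl (fun r i => r + (n + i) * (m + i)) 0)
        = 6 * (h_ * n * m + (n + m) * c2 + c6) := by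
      linear_combination hfold + 3 * (n + m) * hc2 + hc6
    linarith [key]

theorem pyramid_blocks_changed : Claim_changed_pyramid_blocks := by
  unfold Claim_changed_pyramid_blocks; decide

theorem pyramid_blocks_tight : Claim_exact_pyramid_blocks := by
  intro n m h_ _ hD
  obtain ⟨h1, hn, hm⟩ := hD
  subst h1
  unfold pyramid_blocks pyramid_blocks_alt
  have : PySem.List.pyRange 0 1 1 = [0] := by decide
  rw [this]
  simp [PySem.Int.floordiv]
  exact ⟨hn, hm⟩
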